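-- pv_equiv track=rewrite | github.com/maoluois/pythonProject | alg/lesson_12/main.3.py | findReapt2
-- ===== SOURCE A (Python) =====
-- def findReapt2(numList):
--     result = []
--     l = sorted(numList)
--     s = len(numList)
--     t = 0
--     while t <= s - 2:
--         if l[t] == l[t+1]:
--             result.append(l[t])
--         t += 1
--
--     return result
-- ===== SOURCE B (Python) =====
-- def findReapt2(numList):
--     # Run-length scan of the sorted list: each run of length n contributes n-1 copies.
--     l = sorted(numList)
--     n = len(l)
--     result = []
--     i = 0
--     while i < n:
--         run = 1
--         while i + run < n and l[i + run] == l[i]: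
--             run += 1
--         result += [l[i]] * (run - 1)
--         i += run
--     return result
-- ===== Notes on version B (the rewrite author's own statement) =====
-- stated objective: alternative
-- what changed: Replaces the index-pair scan over sorted(numList) (comparing l[t] with l[t+1] for every t) by a run-length grouping loop that finds each maximal run of equal values once and appends key*(run-1) copies.
import Mathlib
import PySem

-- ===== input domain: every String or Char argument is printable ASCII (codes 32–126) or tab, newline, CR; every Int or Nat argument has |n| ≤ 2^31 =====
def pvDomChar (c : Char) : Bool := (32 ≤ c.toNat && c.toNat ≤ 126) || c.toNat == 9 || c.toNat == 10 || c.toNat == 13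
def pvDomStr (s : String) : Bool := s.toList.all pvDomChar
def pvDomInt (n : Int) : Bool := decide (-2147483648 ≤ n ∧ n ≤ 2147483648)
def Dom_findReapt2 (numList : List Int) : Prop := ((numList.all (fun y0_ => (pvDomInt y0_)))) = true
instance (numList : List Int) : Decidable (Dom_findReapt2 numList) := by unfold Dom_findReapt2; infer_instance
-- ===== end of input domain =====

-- B replaces the sorted adjacent index-pair scan by a run-length grouping loop (alternative decomposition, same cost).


-- ===== PORT A =====
-- sorted index-pair scan: while t <= s-2, append l[t] whenever l[t] == l[t+1]
def findReapt2 (numList : List Int) : List Int :=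
  let l := PySem.List.sorted numList (fun x => x) false
  let s : Int := numList.length
  (PySem.List.pyRange 0 (s - 1) 1).foldl
    (fun result t =>
      if PySem.List.pyGetD l t 0 = PySem.List.pyGetD l (t + 1) 0 then
        result ++ [PySem.List.pyGetD l t 0]
      else result) []

-- ===== PORT B =====
-- B-side helper: the run-length loop of Source B — each maximal run of equal
-- values at the front contributes (run length - 1) copies of its value.
def runScan : List Int → List Int
  | [] => []
  | x :: xs =>
    List.replicate (xs.takeWhile (fun y => y == x)).length x ++
      runScan (xs.dropWhile (fun y => y == x))
termination_by l => l.length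
decreasing_by
  simpa using Nat.lt_succ_of_le (List.length_dropWhile_le (fun y => y == x) xs)

def findReapt2_alt (numList : List Int) : List Int :=
  runScan (PySem.List.sorted numList (fun x => x) false)

-- ===== PRECONDITION & SPEC =====
def Spec_findReapt2 (numList : List Int) (out : List Int) : Prop := out = findReapt2_alt numList
instance (numList : List Int) (out : List Int) : Decidable (Spec_findReapt2 numList out) := by unfold Spec_findReapt2; infer_instance

-- ===== CLAIM (what is proved, stated in full; the proofs are below) =====
def Claim_equal_findReapt2 : Prop := ∀ (numList : List Int), Dom_findReapt2 numList → Spec_findReapt2 numList (findReapt2 numList)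

-- ===== LEMMAS AND PROOFS =====

-- adjacent-pair scan, the structural reading of A's index loop
def adjScan : List Int → List Int
  | [] => []
  | [_] => []
  | x :: y :: tl => (if x = y then [x] else []) ++ adjScan (y :: tl)

-- A's index fold over getD-indexing, accumulator generalized
def idxScan (m : List Int) (acc : List Int) : List Int :=
  (List.range (m.length - 1)).foldl
    (fun r t => if m.getD t 0 = m.getD (t + 1) 0 then r ++ [m.getD t 0] else r) acc

theorem idxScan_eq_adjScan (m : List Int) : ∀ acc, idxScan m acc = acc ++ adjScan m := by
  induction m with
  | nil => intro acc; simp [idxScan, adjScan]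
  | cons x xs ih =>
    intro acc
    cases xs with
    | nil => simp [idxScan, adjScan]
    | cons y tl =>
      have h1 : (x :: y :: tl).length - 1 = tl.length + 1 := by simp
      have h2 : idxScan (x :: y :: tl) acc
          = idxScan (y :: tl) (acc ++ if x = y then [x] else []) := by
        simp only [idxScan, h1, List.range_succ_eq_map, List.foldl_cons, List.foldl_map]
        simp [List.getD]
        split_ifs <;> simp
      rw [h2, ih]
      simp [adjScan]

theorem runScan_eq_adjScan (m : List Int) : runScan m = adjScan m := by
  induction m with
  | nil => simp [runScan, adjScan]
  | cons x xs ih =>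
    cases xs with
    | nil => simp [runScan, adjScan]
    | cons y tl =>
      have hr : runScan (x :: y :: tl)
          = List.replicate ((y :: tl).takeWhile (fun z => z == x)).length x ++
            runScan ((y :: tl).dropWhile (fun z => z == x)) := by rw [runScan]
      by_cases hxy : y = x
      · subst hxy
        rw [hr, List.takeWhile_cons_of_pos (by simp), List.dropWhile_cons_of_pos (by simp)]
        have hr2 : runScan (y :: tl)
            = List.replicate (tl.takeWhile (fun z => z == y)).length y ++
              runScan (tl.dropWhile (fun z => z == y)) := by rw [runScan]
        rw [List.length_cons, List.replicate_succ, List.cons_append, ← hr2, ih,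
          adjScan, if_pos rfl]
        simp
      · rw [hr, List.takeWhile_cons_of_neg (by simp [hxy]),
          List.dropWhile_cons_of_neg (by simp [hxy]), ih,
          adjScan, if_neg (fun h => hxy h.symm)]
        simp

-- ===== VERDICT (by name: the statement is the Claim_ definition above) =====
theorem findReapt2_spec : Claim_equal_findReapt2 := by
  intro numList _
  unfold Spec_findReapt2 findReapt2 findReapt2_alt
  show (PySem.List.pyRange 0 ((numList.length : Int) - 1) 1).foldl
      (fun result t =>
        if PySem.List.pyGetD (PySem.List.sorted numList (fun x => x) false) t 0
            = PySem.List.pyGetD (PySem.List.sorted numList (fun x => x) false) (t + 1) 0 then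
          result ++ [PySem.List.pyGetD (PySem.List.sorted numList (fun x => x) false) t 0]
        else result) []
      = runScan (PySem.List.sorted numList (fun x => x) false)
  set l := PySem.List.sorted numList (fun x => x) false with hl
  have hlen : l.length = numList.length := by rw [hl]; simp
  rcases Nat.eq_zero_or_pos numList.length with h0 | hpos
  · have hl0 : l = [] := List.eq_nil_of_length_eq_zero (hlen.trans h0)
    rw [hl0, h0, PySem.List.pyRange_one_eq_nil (by norm_num)]
    simp [runScan]
  · have hcast : ((numList.length : Int) - 1) = ((l.length - 1 : Nat) : Int) := by
      rw [hlen]; omega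
    rw [hcast, PySem.List.pyRange_zero_nat, List.foldl_map]
    have hfun : (fun (r : List Int) (t : Nat) =>
          if PySem.List.pyGetD l (t : Int) 0 = PySem.List.pyGetD l ((t : Int) + 1) 0 then
            r ++ [PySem.List.pyGetD l (t : Int) 0]
          else r)
        = (fun (r : List Int) (t : Nat) =>
            if l.getD t 0 = l.getD (t + 1) 0 then r ++ [l.getD t 0] else r) := by
      funext r t
      have e1 : PySem.List.pyGetD l (t : Int) 0 = l.getD t 0 := PySem.List.pyGetD_natCast l t 0
      have e2 : PySem.List.pyGetD l ((t : Int) + 1) 0 = l.getD (t + 1) 0 := by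
        rw [show ((t : Int) + 1) = ((t + 1 : Nat) : Int) by push_cast; ring]
        exact PySem.List.pyGetD_natCast l (t + 1) 0
      rw [e1, e2]
    rw [hfun]
    rw [show (List.range (l.length - 1)).foldl
          (fun (r : List Int) (t : Nat) =>
            if l.getD t 0 = l.getD (t + 1) 0 then r ++ [l.getD t 0] else r) []
        = idxScan l [] from rfl]
    rw [idxScan_eq_adjScan, runScan_eq_adjScan]
    simp
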